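-- pv_equiv track=rewrite | github.com/finlay-adaptyvbio/parseq-pyhamilton | deck.py | pos_96_in_384
-- ===== SOURCE A (Python) =====
-- def pos_96_in_384(quadrant: int):
--     pos = []
--     if quadrant == 1:
--         q1, q2 = 1, 0
--     elif quadrant == 2:
--         q1, q2 = 0, 1
--     elif quadrant == 3:
--         q1, q2 = 1, 1
--     else:
--         q1, q2 = 0, 0
--
--     for i in range(0 + q1, 24 + q1, 2):
--         for j in range(1 + q2, 17 + q2, 2):
--             pos.append(j + i * 16 - 1)
--     return pos
-- ===== SOURCE B (Python) =====
-- def pos_96_in_384(quadrant: int):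
--     offset = (quadrant in (1, 3)) * 16 + (quadrant in (2, 3))
--     return [32 * (k // 8) + 2 * (k % 8) + offset for k in range(96)]
-- ===== Notes on version B (the rewrite author's own statement) =====
-- stated objective: alternative
-- what changed: Replaces the two nested quadrant-shifted range loops with a single flat pass over indices 0..95 computing each position by the closed-form formula 32*(k//8)+2*(k%8) plus a quadrant offset derived from two tuple-membership tests.
import Mathlib
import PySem

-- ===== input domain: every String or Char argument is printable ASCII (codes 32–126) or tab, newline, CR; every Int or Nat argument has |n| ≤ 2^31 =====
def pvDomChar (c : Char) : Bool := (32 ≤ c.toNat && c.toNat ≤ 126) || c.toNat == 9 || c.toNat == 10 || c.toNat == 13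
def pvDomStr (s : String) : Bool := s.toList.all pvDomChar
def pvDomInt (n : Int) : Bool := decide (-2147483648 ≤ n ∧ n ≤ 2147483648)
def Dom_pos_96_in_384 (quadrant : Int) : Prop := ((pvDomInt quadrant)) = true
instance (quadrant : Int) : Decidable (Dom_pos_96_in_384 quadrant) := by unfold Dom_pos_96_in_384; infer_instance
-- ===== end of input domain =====

-- B replaces the nested quadrant-shifted loops by one flat pass computing each entry by a divmod closed form plus a quadrant offset (alternative algorithm).

-- ===== PORT A =====
def pos_96_in_384 (quadrant : Int) : List Int :=
  let q12 : Int × Int :=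
    if quadrant = 1 then (1, 0)
    else if quadrant = 2 then (0, 1)
    else if quadrant = 3 then (1, 1)
    else (0, 0)
  (PySem.List.pyRange (0 + q12.1) (24 + q12.1) 2).foldl (fun pos i =>
    (PySem.List.pyRange (1 + q12.2) (17 + q12.2) 2).foldl (fun pos j =>
      pos ++ [j + i * 16 - 1]) pos) []

-- ===== PORT B =====
def pos_96_in_384_alt (quadrant : Int) : List Int :=
  let offset : Int :=
    (if quadrant = 1 ∨ quadrant = 3 then (1:Int) else 0) * 16 +
    (if quadrant = 2 ∨ quadrant = 3 then (1:Int) else 0)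
  (PySem.List.pyRange 0 96 1).map (fun k =>
    32 * PySem.Int.floordiv k 8 + 2 * PySem.Int.mod k 8 + offset)

-- ===== PRECONDITION & SPEC =====
def Spec_pos_96_in_384 (quadrant : Int) (out : List Int) : Prop := out = pos_96_in_384_alt quadrant
instance (quadrant : Int) (out : List Int) : Decidable (Spec_pos_96_in_384 quadrant out) := by unfold Spec_pos_96_in_384; infer_instance

-- ===== CLAIM =====
def Claim_equal_pos_96_in_384 : Prop := ∀ (quadrant : Int), Dom_pos_96_in_384 quadrant → Spec_pos_96_in_384 quadrant (pos_96_in_384 quadrant)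

-- ===== LEMMAS AND PROOFS =====

-- ===== VERDICT =====
set_option maxRecDepth 8000 in
theorem pos_96_in_384_spec : Claim_equal_pos_96_in_384 := by
  intro q _
  unfold Spec_pos_96_in_384
  by_cases h1 : q = 1
  · subst h1; decide
  · by_cases h2 : q = 2
    · subst h2; decide
    · by_cases h3 : q = 3
      · subst h3; decide
      · simp only [pos_96_in_384, pos_96_in_384_alt, if_neg h1, if_neg h2, if_neg h3,
          if_neg (by tauto : ¬(q = 1 ∨ q = 3)), if_neg (by tauto : ¬(q = 2 ∨ q = 3))]
        decide
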